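-- pv_equiv track=rewrite | github.com/tgy1201/coding-test | SWEA/D2/1979. 어디에 단어가 들어갈 수 있을까/어디에 단어가 들어갈 수 있을까.py | calc
-- ===== SOURCE A (Python) =====
-- def calc(arr, K):
--     total = 0
--
--     for i in arr:
--         check = 0
--         temp = []
--         for j in i:
--             if j == 1:
--                 check += 1
--             else:
--                 temp.append(check)
--                 check = 0
--
--         if check != 0:
--             temp.append(check)
--
--         total += temp.count(K)
--     return total
-- ===== SOURCE B (Python) =====
-- def calc(arr, K):
--     total = 0
--     for row in arr:
--         s = ''.join('1' if x == 1 else '0' for x in row)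
--         runs = [r for r in s.split('0') if r]
--         total += sum(1 for r in runs if len(r) == K)
--     return total
-- ===== Notes on version B (the rewrite author's own statement) =====
-- stated objective: idiomatic
-- what changed: B maps each row to a '1'/'0' string and segments it with str.split('0'), counting nonempty runs of length K, instead of A's cell-by-cell run counter that accumulates a temp list of run lengths (including spurious zeros).
-- intended difference: For K = 0 on inputs where some row has a non-1 element at the start or right after another non-1, A counts those spurious zero entries of its temp list and returns their number, while B returns 0, the intended count of 1-runs of length 0 (there are none); a word of length 0 fits nowhere. — e.g. on calc([[0]], 0): A returns 1, B returns 0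
import Mathlib
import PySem

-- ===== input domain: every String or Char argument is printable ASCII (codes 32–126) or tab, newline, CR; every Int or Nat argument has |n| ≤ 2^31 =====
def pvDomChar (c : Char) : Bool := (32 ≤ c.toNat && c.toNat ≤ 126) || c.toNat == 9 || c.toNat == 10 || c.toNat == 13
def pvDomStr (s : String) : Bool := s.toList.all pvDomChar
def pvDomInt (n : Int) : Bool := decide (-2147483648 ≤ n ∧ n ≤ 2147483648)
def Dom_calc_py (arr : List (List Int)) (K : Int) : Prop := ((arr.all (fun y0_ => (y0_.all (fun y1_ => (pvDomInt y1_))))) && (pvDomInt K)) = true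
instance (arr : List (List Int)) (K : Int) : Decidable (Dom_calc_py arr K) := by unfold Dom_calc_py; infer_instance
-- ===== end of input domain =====

-- B segments each row as a '1'/'0' string split on '0' (runs of 1s directly) instead of A's
-- cell-by-cell counter with a temp list; objective: more idiomatic, same cost.

-- ===== PORT A =====
-- inner loop of A: state (check, temp); each element either extends the run or flushes it
def calcStepA (p : Int × List Int) (j : Int) : Int × List Int :=
  if j == 1 then (p.1 + 1, p.2) else (0, p.2 ++ [p.1])

-- A's temp list for one row, after the trailing 'if check != 0' append
def calcTempA (i : List Int) : List Int :=
  let st := i.foldl calcStepA (0, [])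
  if st.1 ≠ 0 then st.2 ++ [st.1] else st.2

def calc_py (arr : List (List Int)) (K : Int) : Int :=
  arr.foldl (fun total i => total + (PySem.List.count (calcTempA i) K : Int)) 0

-- ===== PORT B =====
-- '1' if x == 1 else '0'
def toBit (x : Int) : Char := if x == 1 then '1' else '0'

-- hand port of str.split('0') on the built string (exact: left to right, keeps empty chunks)
def split0 : List Char → List (List Char)
  | [] => [[]]
  | c :: rest =>
    match split0 rest with
    | [] => []  -- unreachable: split0 never returns []
    | h :: t => if c == '0' then [] :: h :: t else (c :: h) :: t

-- runs = [r for r in s.split('0') if r]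
def rowRuns (row : List Int) : List (List Char) :=
  (split0 (row.map toBit)).filter (fun r => !r.isEmpty)

def calc_py_alt (arr : List (List Int)) (K : Int) : Int :=
  arr.foldl (fun total row =>
    total + (((rowRuns row).filter (fun r => (r.length : Int) == K)).length : Int)) 0

-- ===== PRECONDITION & SPEC =====
-- For K = 0 on inputs where some row has a non-1 element at the start or right after another
-- non-1, A counts the spurious zero entries of its temp list and returns their number, while B
-- returns 0, the intended count of 1-runs of length 0 (there are none).
-- badAux p row = true iff row has a non-1 element that is first or follows a non-1 (p = 'previous element was 1')
def badAux : Bool → List Int → Bool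
  | _, [] => false
  | p, j :: l => if j == 1 then badAux true l else (!p) || badAux false l

def D_calc_py (arr : List (List Int)) (K : Int) : Prop :=
  K = 0 ∧ arr.any (badAux false) = true
instance (arr : List (List Int)) (K : Int) : Decidable (D_calc_py arr K) := by
  unfold D_calc_py; infer_instance

def Spec_calc_py (arr : List (List Int)) (K : Int) (out : Int) : Prop :=
  ¬ D_calc_py arr K → out = calc_py_alt arr K
instance (arr : List (List Int)) (K : Int) (out : Int) : Decidable (Spec_calc_py arr K out) := by
  unfold Spec_calc_py; infer_instance

def pvDiffWitness_calc_py : List (List Int) × Int := ([[0]], 0)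
def pvDiffWitnessOut_calc_py : Int × Int := (1, 0)

-- ===== CLAIM (what is proved, stated in full; the proofs are below) =====
def Claim_unchanged_calc_py : Prop := ∀ (arr : List (List Int)) (K : Int), Dom_calc_py arr K → Spec_calc_py arr K (calc_py arr K)
def Claim_changed_calc_py : Prop := Dom_calc_py (pvDiffWitness_calc_py.1) (pvDiffWitness_calc_py.2) ∧ D_calc_py (pvDiffWitness_calc_py.1) (pvDiffWitness_calc_py.2) ∧ calc_py (pvDiffWitness_calc_py.1) (pvDiffWitness_calc_py.2) = pvDiffWitnessOut_calc_py.1 ∧ calc_py_alt (pvDiffWitness_calc_py.1) (pvDiffWitness_calc_py.2) = pvDiffWitnessOut_calc_py.2 ∧ pvDiffWitnessOut_calc_py.1 ≠ pvDiffWitnessOut_calc_py.2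
def Claim_exact_calc_py : Prop := ∀ (arr : List (List Int)) (K : Int), Dom_calc_py arr K → D_calc_py arr K → calc_py arr K ≠ calc_py_alt arr K

-- ===== LEMMAS AND PROOFS =====

-- abstract recursion computing A's per-row count from a pending run of length n
def gA (K : Int) : Nat → List Int → Int
  | n, [] => if (n : Int) = K ∧ n ≠ 0 then 1 else 0
  | n, j :: l => if j = 1 then gA K (n + 1) l else (if (n : Int) = K then 1 else 0) + gA K 0 l

lemma gA_nonneg (K : Int) : ∀ (n : Nat) (l : List Int), 0 ≤ gA K n l := by
  intro n l
  induction l generalizing n with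
  | nil => simp [gA]; split <;> simp
  | cons j l ih =>
    simp only [gA]
    split
    · exact ih _
    · have := ih 0; split <;> omega

def finA (n : Int) (t : List Int) (l : List Int) : List Int :=
  let st := l.foldl calcStepA (n, t)
  if st.1 ≠ 0 then st.2 ++ [st.1] else st.2

lemma finA_cons (n : Int) (t : List Int) (j : Int) (l : List Int) :
    finA n t (j :: l) = if j = 1 then finA (n + 1) t l else finA 0 (t ++ [n]) l := by
  by_cases hj : j = 1
  · simp [finA, calcStepA, hj]
  · simp [finA, calcStepA, hj]

lemma countA_bridge (K : Int) : ∀ (l : List Int) (n : Nat) (t : List Int),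
    (PySem.List.count (finA (n : Int) t l) K : Int)
      = (PySem.List.count t K : Int) + gA K n l := by
  intro l
  induction l with
  | nil =>
    intro n t
    simp only [finA, List.foldl_nil, gA, PySem.List.count_eq]
    by_cases hn : n = 0
    · subst hn; simp
    · have h0 : ((n : Int) ≠ 0) := by exact_mod_cast hn
      simp only [ne_eq, h0, not_false_iff, if_true, List.count_append, List.count_singleton]
      by_cases hk : (n : Int) = K
      · simp [hk, hn]
      · have hbe : (((n : Int) == K) = false) := beq_eq_false_iff_ne.mpr hk
        simp [hk, hn, hbe]
  | cons j l ih =>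
    intro n t
    rw [finA_cons]
    by_cases hj : j = 1
    · rw [if_pos hj]
      have hc : ((n : Int) + 1) = ((n + 1 : Nat) : Int) := by push_cast; ring
      rw [hc, ih]
      simp [gA, hj]
    · rw [if_neg hj]
      have := ih 0 (t ++ [(n : Int)])
      rw [(by norm_num : ((0 : Nat) : Int) = 0)] at this
      rw [this]
      simp only [gA, if_neg hj, PySem.List.count_eq, List.count_append, List.count_singleton]
      by_cases hk : (n : Int) = K
      · simp [hk]; ring
      · have hbe : (((n : Int) == K) = false) := beq_eq_false_iff_ne.mpr hk
        simp [hk, hbe]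

lemma rowA_eq_gA (K : Int) (i : List Int) :
    (PySem.List.count (calcTempA i) K : Int) = gA K 0 i := by
  have h := countA_bridge K i 0 []
  simpa [calcTempA, finA, PySem.List.count_eq] using h

-- B side: the count of kept runs of length K among a list of chunks
def chunkCnt (K : Int) (cs : List (List Char)) : Int :=
  (((cs.filter (fun r => !r.isEmpty)).filter (fun r => (r.length : Int) == K)).length : Int)

-- the count over split0 of a pending run of n ones ++ the row's remaining bits
def chunkCountB (K : Int) (cs : List Char) : Int := chunkCnt K (split0 cs)

lemma chunkCnt_nil (K : Int) : chunkCnt K [] = 0 := by simp [chunkCnt]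

lemma chunkCnt_cons (K : Int) (h : List Char) (tl : List (List Char)) :
    chunkCnt K (h :: tl)
      = (if (h.length : Int) = K ∧ h ≠ [] then 1 else 0) + chunkCnt K tl := by
  unfold chunkCnt
  by_cases he : h = []
  · subst he; simp
  · rw [List.filter_cons_of_pos (by simpa using he)]
    by_cases hk : (h.length : Int) = K
    · rw [List.filter_cons_of_pos (by simpa using hk)]
      simp only [List.length_cons, hk, he, ne_eq, not_false_iff, and_true, if_true]
      push_cast; ring
    · rw [List.filter_cons_of_neg (by simpa using hk)]
      simp [hk]

lemma split0_ne_nil : ∀ s : List Char, split0 s ≠ [] := by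
  intro s
  induction s with
  | nil => simp [split0]
  | cons c rest ih =>
    cases h : split0 rest with
    | nil => exact absurd h ih
    | cons a b =>
      simp only [split0, h]
      split <;> simp

lemma split0_ones : ∀ n : Nat, split0 (List.replicate n '1') = [List.replicate n '1'] := by
  intro n
  induction n with
  | zero => simp [split0]
  | succ m ih => simp [List.replicate_succ, split0, ih]

lemma split0_ones_zero : ∀ (n : Nat) (rest : List Char),
    split0 (List.replicate n '1' ++ '0' :: rest) = List.replicate n '1' :: split0 rest := by
  intro n
  induction n with
  | zero =>
    intro rest
    cases h : split0 rest with
    | nil => exact absurd h (split0_ne_nil rest)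
    | cons a b => simp [split0, h]
  | succ m ih =>
    intro rest
    simp [List.replicate_succ, split0, ih rest]

lemma chunk_flush (K : Int) (n : Nat) :
    (if ((List.replicate n '1').length : Int) = K ∧ List.replicate n '1' ≠ [] then (1:Int) else 0)
      = if (n : Int) = K ∧ n ≠ 0 then 1 else 0 := by
  simp [List.length_replicate, List.replicate_eq_nil_iff]

lemma chunk_singleton (K : Int) (n : Nat) :
    chunkCountB K (List.replicate n '1') = if (n : Int) = K ∧ n ≠ 0 then 1 else 0 := by
  rw [chunkCountB, split0_ones, chunkCnt_cons, chunkCnt_nil, add_zero, chunk_flush]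

-- recursion for B matching gA except the n = 0 flush case
lemma chunk_rec (K : Int) : ∀ (l : List Int) (n : Nat),
    chunkCountB K (List.replicate n '1' ++ l.map toBit)
      = match l with
        | [] => if (n : Int) = K ∧ n ≠ 0 then 1 else 0
        | j :: l' =>
          if j = 1 then chunkCountB K (List.replicate (n + 1) '1' ++ l'.map toBit)
          else (if (n : Int) = K ∧ n ≠ 0 then 1 else 0)
                 + chunkCountB K (List.replicate 0 '1' ++ l'.map toBit) := by
  intro l n
  cases l with
  | nil => simpa using chunk_singleton K n
  | cons j l' =>
    by_cases hj : j = 1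
    · subst hj
      dsimp only
      rw [if_pos rfl, List.map_cons, (by decide : toBit 1 = '1'),
          (by simp [List.replicate_succ', List.append_assoc] :
            List.replicate n '1' ++ '1' :: l'.map toBit
              = List.replicate (n + 1) '1' ++ l'.map toBit)]
    · have hb : toBit j = '0' := by simp [toBit, hj]
      dsimp only
      rw [if_neg hj, List.map_cons, hb, chunkCountB, split0_ones_zero n (l'.map toBit),
          chunkCnt_cons, chunk_flush]
      rfl

lemma gA_eq_chunk_of_ne (K : Int) (hK : K ≠ 0) : ∀ (l : List Int) (n : Nat),
    gA K n l = chunkCountB K (List.replicate n '1' ++ l.map toBit) := by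
  intro l
  induction l with
  | nil =>
    intro n; rw [chunk_rec]; simp [gA]
  | cons j l ih =>
    intro n
    rw [chunk_rec]
    by_cases hj : j = 1
    · simp only [gA, hj]; exact ih (n + 1)
    · simp only [gA, if_neg hj]
      rw [← ih 0]
      congr 1
      by_cases hk : (n : Int) = K
      · have hn : n ≠ 0 := by
          intro h0; subst h0; exact hK (by simpa using hk.symm)
        simp [hk, hn]
      · simp [hk]

lemma chunk_zero_eq_zero (K : Int) (hK : K = 0) : ∀ (l : List Int) (n : Nat),
    chunkCountB K (List.replicate n '1' ++ l.map toBit) = 0 := by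
  intro l
  induction l with
  | nil =>
    intro n; rw [chunk_rec]
    subst hK
    simp
  | cons j l ih =>
    intro n
    rw [chunk_rec]
    subst hK
    have h2 : ¬ ((n : Int) = 0 ∧ n ≠ 0) := by rintro ⟨h1, h2⟩; exact h2 (by exact_mod_cast h1)
    by_cases hj : j = 1
    · simp only [if_pos hj]; exact ih (n + 1)
    · simp only [if_neg hj, h2, if_false]; simpa using ih 0

lemma gA_zero_good (l : List Int) : ∀ (n : Nat), badAux (decide (n ≠ 0)) l = false →
    gA 0 n l = 0 := by
  induction l with
  | nil =>
    intro n _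
    simp only [gA]
    simp
  | cons j l ih =>
    intro n hb
    by_cases hj : j = 1
    · simp only [gA, if_pos hj]
      subst hj
      rw [show badAux (decide (n ≠ 0)) (1 :: l) = badAux true l from by
        simp [badAux]] at hb
      exact ih (n + 1) (by simpa using hb)
    · simp only [gA, if_neg hj]
      have hbe : ((j == 1) = false) := beq_eq_false_iff_ne.mpr hj
      rw [show badAux (decide (n ≠ 0)) (j :: l) = ((!decide (n ≠ 0)) || badAux false l) from by
        simp [badAux, hbe]] at hb
      rw [Bool.or_eq_false_iff] at hb
      obtain ⟨hp, hrest⟩ := hb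
      have hn : n ≠ 0 := by
        intro h0; subst h0; simp at hp
      have h1 : ¬ ((n : Int) = 0) := by intro h; exact hn (by exact_mod_cast h)
      rw [ih 0 (by simpa using hrest)]
      simp [hn]

lemma gA_zero_bad (l : List Int) : ∀ (n : Nat), badAux (decide (n ≠ 0)) l = true →
    1 ≤ gA 0 n l := by
  induction l with
  | nil => intro n hb; simp [badAux] at hb
  | cons j l ih =>
    intro n hb
    by_cases hj : j = 1
    · simp only [gA, if_pos hj]
      subst hj
      rw [show badAux (decide (n ≠ 0)) (1 :: l) = badAux true l from by
        simp [badAux]] at hb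
      exact ih (n + 1) (by simpa using hb)
    · simp only [gA, if_neg hj]
      have hbe : ((j == 1) = false) := beq_eq_false_iff_ne.mpr hj
      rw [show badAux (decide (n ≠ 0)) (j :: l) = ((!decide (n ≠ 0)) || badAux false l) from by
        simp [badAux, hbe]] at hb
      rw [Bool.or_eq_true] at hb
      rcases hb with hp | hrest
      · have hn : n = 0 := by
          by_contra h0; simp [h0] at hp
        have := gA_nonneg 0 0 l
        simp [hn]; omega
      · have := ih 0 (by simpa using hrest)
        split <;> omega

-- rewrite B's fold body through chunkCountB
lemma rowB_eq_chunk (K : Int) (row : List Int) :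
    (((rowRuns row).filter (fun r => (r.length : Int) == K)).length : Int)
      = chunkCountB K (List.replicate 0 '1' ++ row.map toBit) := rfl

theorem calc_py_unchanged : ∀ (arr : List (List Int)) (K : Int), ¬ D_calc_py arr K →
    calc_py arr K = calc_py_alt arr K := by
  intro arr K hD
  unfold calc_py calc_py_alt
  apply PySem.List.foldl_congr_mem
  intro acc row hrow
  congr 1
  rw [rowA_eq_gA, rowB_eq_chunk]
  by_cases hK : K = 0
  · have hgood : badAux false row = false := by
      by_contra h
      exact hD ⟨hK, List.any_eq_true.mpr ⟨row, hrow, by simpa using h⟩⟩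
    rw [chunk_zero_eq_zero K hK]
    subst hK
    exact gA_zero_good row 0 (by simpa using hgood)
  · exact gA_eq_chunk_of_ne K hK row 0

-- A's total is at least t plus 1 when some remaining row is bad (K = 0), and ≥ t always
lemma foldA_ge (arr : List (List Int)) : ∀ t : Int,
    t ≤ arr.foldl (fun total i => total + (PySem.List.count (calcTempA i) 0 : Int)) t := by
  induction arr with
  | nil => intro t; simp
  | cons r arr ih =>
    intro t
    have h1 := ih (t + (PySem.List.count (calcTempA r) 0 : Int))
    simp only [List.foldl_cons]
    have : (0 : Int) ≤ (PySem.List.count (calcTempA r) 0 : Int) := by positivity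
    omega

lemma foldA_pos (arr : List (List Int)) : ∀ t : Int, (∃ r ∈ arr, badAux false r = true) →
    t + 1 ≤ arr.foldl (fun total i => total + (PySem.List.count (calcTempA i) 0 : Int)) t := by
  induction arr with
  | nil => rintro t ⟨r, hr, _⟩; simp at hr
  | cons r arr ih =>
    rintro t ⟨r', hr', hbad⟩
    simp only [List.foldl_cons]
    rcases List.mem_cons.mp hr' with h | h
    · subst h
      have h1 : 1 ≤ (PySem.List.count (calcTempA r') 0 : Int) := by
        rw [rowA_eq_gA]; exact gA_zero_bad r' 0 (by simpa using hbad)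
      have h2 := foldA_ge arr (t + (PySem.List.count (calcTempA r') 0 : Int))
      omega
    · have h1 := ih (t + (PySem.List.count (calcTempA r) 0 : Int)) ⟨r', h, hbad⟩
      have : (0 : Int) ≤ (PySem.List.count (calcTempA r) 0 : Int) := by positivity
      omega

lemma foldB_zero (arr : List (List Int)) : ∀ t : Int,
    arr.foldl (fun total row =>
      total + (((rowRuns row).filter (fun r => (r.length : Int) == (0:Int))).length : Int)) t = t := by
  induction arr with
  | nil => intro t; simp
  | cons r arr ih =>
    intro t
    simp only [List.foldl_cons]
    have h : (((rowRuns r).filter (fun q => (q.length : Int) == (0:Int))).length : Int) = 0 := by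
      rw [rowB_eq_chunk]; exact chunk_zero_eq_zero 0 rfl r 0
    rw [h, add_zero, ih]

-- ===== VERDICT (by name: the statement is the Claim_ definition above) =====
theorem calc_py_spec : Claim_unchanged_calc_py := by
  intro arr K _ hD
  exact calc_py_unchanged arr K hD

theorem calc_py_changed : Claim_changed_calc_py := by
  unfold Claim_changed_calc_py; decide

theorem calc_py_tight : Claim_exact_calc_py := by
  intro arr K _ hD
  obtain ⟨hK, hbad⟩ := hD
  subst hK
  obtain ⟨r, hr, hb⟩ := List.any_eq_true.mp hbad
  unfold calc_py calc_py_alt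
  rw [foldB_zero]
  have := foldA_pos arr 0 ⟨r, hr, by simpa using hb⟩
  omega
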